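-- pv_equiv track=rewrite | github.com/mivoq/speect | docs/sphinxext/doxybridge/domains/inheritance_diagram.py | _class_info
-- ===== SOURCE A (Python) =====
-- def _class_info(class_names):
--     class_info = []
--     num_inherit = len(class_names)
--     inherit_cnt = 0
--
--     for cls in class_names:
--         if inherit_cnt == 0:
--             class_info.append((cls, []))
--         else:
--             class_info.append((cls, [class_names[inherit_cnt-1]]))
--         inherit_cnt += 1
--
--     return class_info
-- ===== SOURCE B (Python) =====
-- def _class_info(class_names):
--     # Build the output back-to-front: walk the list in reverse, and each time
--     # we step past an element emit the pair for its successor; reverse at the end.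
--     backward = []
--     nxt = None
--     for cls in reversed(class_names):
--         if nxt is not None:
--             backward.append((nxt, [cls]))
--         nxt = cls
--     if nxt is not None:
--         backward.append((nxt, []))
--     backward.reverse()
--     return backward
-- ===== Notes on version B (the rewrite author's own statement) =====
-- stated objective: alternative
-- what changed: Builds the result back-to-front: a single walk over the reversed list emits each element's successor paired with it, with the head pair appended last and one final reverse, instead of A's forward counter-and-index loop.
import Mathlib
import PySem

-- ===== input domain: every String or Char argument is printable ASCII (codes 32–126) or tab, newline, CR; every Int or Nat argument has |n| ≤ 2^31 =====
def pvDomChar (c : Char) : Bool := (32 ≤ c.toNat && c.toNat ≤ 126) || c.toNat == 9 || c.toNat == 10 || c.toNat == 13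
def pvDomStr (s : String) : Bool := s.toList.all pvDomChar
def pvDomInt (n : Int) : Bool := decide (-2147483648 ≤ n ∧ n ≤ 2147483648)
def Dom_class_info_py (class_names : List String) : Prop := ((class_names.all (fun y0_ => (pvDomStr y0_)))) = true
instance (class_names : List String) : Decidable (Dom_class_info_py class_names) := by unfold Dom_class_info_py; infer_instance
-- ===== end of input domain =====

-- B builds the result back-to-front over the reversed list instead of A's forward counter-and-index loop (objective: alternative).
-- ===== PORT A =====
def class_info_py (class_names : List String) : List (String × List String) :=
  (class_names.foldl
    (fun (st : List (String × List String) × Int) cls =>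
      if st.2 == 0 then (st.1 ++ [(cls, [])], st.2 + 1)
      else (st.1 ++ [(cls, ((PySem.List.pyGet? class_names (st.2 - 1)).map (fun p => [p])).getD [])], st.2 + 1))
    ([], 0)).1

-- ===== PORT B =====
def class_info_py_alt (class_names : List String) : List (String × List String) :=
  let st := class_names.reverse.foldl
    (fun (st : List (String × List String) × Option String) cls =>
      match st.2 with
      | none => (st.1, some cls)
      | some nxt => (st.1 ++ [(nxt, [cls])], some cls))
    ([], none)
  let backward := match st.2 with
    | none => st.1
    | some nxt => st.1 ++ [(nxt, [])]
  backward.reverse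

-- ===== PRECONDITION & SPEC =====
def Spec_class_info_py (class_names : List String) (out : List (String × List String)) : Prop := out = class_info_py_alt class_names
instance (class_names : List String) (out : List (String × List String)) : Decidable (Spec_class_info_py class_names out) := by unfold Spec_class_info_py; infer_instance

-- ===== CLAIM (what is proved, stated in full; the proofs are below) =====
def Claim_equal_class_info_py : Prop := ∀ (class_names : List String), Dom_class_info_py class_names → Spec_class_info_py class_names (class_info_py class_names)

-- ===== LEMMAS AND PROOFS =====
-- A's loop, from counter k+1 onwards, appends predecessor pairs (zip of the tail with the shifted list).
theorem class_info_foldl (full : List String) (rest : List String) (acc : List (String × List String)) (k : Nat)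
    (h : k + rest.length ≤ full.length) :
    (rest.foldl
      (fun (st : List (String × List String) × Int) cls =>
        if st.2 == 0 then (st.1 ++ [(cls, [])], st.2 + 1)
        else (st.1 ++ [(cls, ((PySem.List.pyGet? full (st.2 - 1)).map (fun p => [p])).getD [])], st.2 + 1))
      (acc, ((k : Int) + 1))).1
    = acc ++ (List.zip rest (full.drop k)).map (fun p => (p.1, [p.2])) := by
  induction rest generalizing acc k with
  | nil => simp
  | cons x xs ih =>
    have hk : k < full.length := by simp at h; omega
    have hget : PySem.List.pyGet? full ((k : Int) + 1 - 1) = some full[k] := by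
      have : ((k : Int) + 1 - 1) = (k : Int) := by ring
      rw [this, PySem.List.pyGet?_natCast]
      simp [List.getElem?_eq_getElem hk]
    have hdrop : full.drop k = full[k] :: full.drop (k + 1) :=
      List.drop_eq_getElem_cons hk
    simp only [List.foldl_cons]
    have hne : ((k : Int) + 1 == 0) = false := by simp; omega
    rw [hne]
    simp only [hget, Option.map_some, Option.getD_some]
    have : ((k : Int) + 1 + 1) = ((k + 1 : Nat) : Int) + 1 := by push_cast; ring
    rw [this]
    simp only [Bool.false_eq_true, if_false]
    rw [ih (acc ++ [(x, [full[k]])]) (k + 1) (by simp at h ⊢; omega)]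
    rw [hdrop, List.zip_cons_cons, List.map_cons]
    simp

-- B's loop from a 'some' state: the remaining walk appends one successor pair per element.
theorem class_info_alt_foldl (l : List String) (a : String) (acc : List (String × List String)) :
    (l.foldl
      (fun (st : List (String × List String) × Option String) cls =>
        match st.2 with
        | none => (st.1, some cls)
        | some nxt => (st.1 ++ [(nxt, [cls])], some cls))
      (acc, some a))
    = (acc ++ (List.zip (a :: l) l).map (fun p => (p.1, [p.2])), some (l.getLastD a)) := by
  induction l generalizing a acc with
  | nil => simp
  | cons x xs ih =>
    simp only [List.foldl_cons]
    rw [ih x (acc ++ [(a, [x])])]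
    simp only [List.zip_cons_cons, List.map_cons, List.append_assoc, List.cons_append, List.nil_append, Prod.mk.injEq]
    exact ⟨trivial, by cases xs <;> simp [List.getLast?_cons]⟩

-- reversing the backward zip gives the forward predecessor zip
theorem zip_reverse_tail (l : List String) :
    (List.zip l.reverse l.reverse.tail).reverse = List.zip l.tail l := by
  apply List.ext_getElem
  · simp only [List.length_reverse, List.length_zip, List.length_tail]
    omega
  · intro i h1 h2
    have hlen : (List.zip l.reverse l.reverse.tail).length = l.length - 1 := by
      simp only [List.length_zip, List.length_reverse, List.length_tail]; omega
    have hi : i < l.length - 1 := by simpa [hlen] using h1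
    have hl : 1 ≤ l.length := by omega
    simp only [List.getElem_reverse, List.getElem_zip, List.getElem_tail]
    simp only [hlen]
    congr 1 <;> (congr 1; omega)


-- ===== VERDICT (by name: the statement is the Claim_ definition above) =====
theorem class_info_py_spec : Claim_equal_class_info_py := by
  intro class_names _
  unfold Spec_class_info_py
  cases hcn : class_names with
  | nil => simp [class_info_py, class_info_py_alt]
  | cons c rest =>
    -- A side: normal form (c,[]) :: zip rest (c::rest)
    have hA : class_info_py (c :: rest)
        = (c, []) :: (List.zip rest (c :: rest)).map (fun p => (p.1, [p.2])) := by
      unfold class_info_py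
      simp only [List.foldl_cons]
      have h0 : ((0 : Int) == 0) = true := by decide
      rw [h0]
      simp only [if_true, List.nil_append]
      have := class_info_foldl (c :: rest) rest [(c, [])] 0 (by simp)
      simpa using this
    -- B side: same normal form
    have hB : class_info_py_alt (c :: rest)
        = (c, []) :: (List.zip rest (c :: rest)).map (fun p => (p.1, [p.2])) := by
      unfold class_info_py_alt
      cases hrev : (c :: rest).reverse with
      | nil => exact absurd hrev (by simp)
      | cons hR tR =>
        have hlast : tR.getLastD hR = c := by
          have h1 : (hR :: tR).getLast? = some (tR.getLastD hR) := by
            simp [List.getLast?_cons]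
          have h2 : (c :: rest).reverse.getLast? = some c := by
            simp [List.getLast?_reverse]
          rw [hrev] at h2
          rw [h1] at h2
          exact (Option.some_inj.mp h2)
        simp only [List.foldl_cons]
        rw [class_info_alt_foldl tR hR []]
        simp only [List.nil_append, hlast]
        rw [List.reverse_append]
        have hz : ((List.zip (hR :: tR) tR).map (fun p => (p.1, [p.2]))).reverse
            = (List.zip rest (c :: rest)).map (fun p => (p.1, [p.2])) := by
          rw [← List.map_reverse]
          have : List.zip (hR :: tR) tR = List.zip (c :: rest).reverse (c :: rest).reverse.tail := by
            rw [hrev]; rfl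
          rw [this, zip_reverse_tail]
          simp
        rw [hz]
        simp
    rw [hA, hB]
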